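-- pv_equiv track=rewrite | github.com/GoombaG/HockeyStats | server/server.py | extractStreakData
-- ===== SOURCE A (Python) =====
-- def extractStreakData(playerGameData: list):
--     parsedData = {
--         "goalStreakLength" : 0,
--         "goalStreak" : 0,
--         "assistStreakLength" : 0,
--         "assistStreak" : 0,
--         "pointStreakLength" : 0,
--         "pointStreak" : 0,
--     }
--     goalStreak = True
--     assistStreak = True
--     pointStreak = True
--
--     for game in playerGameData:
--         if goalStreak and game["goals"] > 0:
--             parsedData["goalStreakLength"] += 1
--             parsedData["goalStreak"] += game["goals"]
--         else:
--             goalStreak = False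
--         if assistStreak and game["assists"] > 0:
--             parsedData["assistStreakLength"] += 1
--             parsedData["assistStreak"] += game["assists"]
--         else:
--             assistStreak = False
--         if pointStreak and (game["goals"] > 0 or game["assists"]):
--             parsedData["pointStreakLength"] += 1
--             parsedData["pointStreak"] += game["goals"] + game["assists"]
--         else:
--             pointStreak = False
--
--     return parsedData
-- ===== SOURCE B (Python) =====
-- def _leadingRun(pred, games):
--     run = []
--     for g in games:
--         if not pred(g):
--             break
--         run.append(g)
--     return run
--
-- def extractStreakData(playerGameData: list):
--     goalRun = _leadingRun(lambda g: g["goals"] > 0, playerGameData)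
--     assistRun = _leadingRun(lambda g: g["assists"] > 0, playerGameData)
--     pointRun = _leadingRun(lambda g: g["goals"] > 0 or g["assists"], playerGameData)
--     return {
--         "goalStreakLength": len(goalRun),
--         "goalStreak": sum(g["goals"] for g in goalRun),
--         "assistStreakLength": len(assistRun),
--         "assistStreak": sum(g["assists"] for g in assistRun),
--         "pointStreakLength": len(pointRun),
--         "pointStreak": sum(g["goals"] + g["assists"] for g in pointRun),
--     }
-- ===== Notes on version B (the rewrite author's own statement) =====
-- stated objective: simpler
-- what changed: Replaces the single stateful loop with three boolean streak flags by three independent leading-run (takewhile-style) extractions whose length and sum give each statistic directly.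
import Mathlib
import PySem

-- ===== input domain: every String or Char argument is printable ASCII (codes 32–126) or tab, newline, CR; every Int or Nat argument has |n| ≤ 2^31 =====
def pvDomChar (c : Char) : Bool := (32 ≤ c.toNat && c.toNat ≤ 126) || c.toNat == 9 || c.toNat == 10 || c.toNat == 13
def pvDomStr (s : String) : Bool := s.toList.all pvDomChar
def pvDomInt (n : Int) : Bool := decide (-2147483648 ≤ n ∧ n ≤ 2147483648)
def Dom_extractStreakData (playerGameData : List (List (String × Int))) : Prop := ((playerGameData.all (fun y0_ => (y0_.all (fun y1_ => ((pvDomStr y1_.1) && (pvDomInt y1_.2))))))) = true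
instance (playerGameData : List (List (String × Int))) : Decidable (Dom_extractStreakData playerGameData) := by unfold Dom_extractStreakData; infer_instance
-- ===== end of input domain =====

-- B replaces A's single stateful loop (three boolean streak flags) by three independent
-- leading-run extractions (takewhile-style), reading length and sum off each run: simpler.


-- ===== PORT A =====
-- game["goals"] / game["assists"]: a game assoc list is a Python dict; with Pre_ the key is
-- present, so the getD default 0 is never read (KeyError inputs are excluded by Pre_).
def pvGoals (g : List (String × Int)) : Int := (PySem.Dict.ofList g).getD "goals" 0
def pvAssists (g : List (String × Int)) : Int := (PySem.Dict.ofList g).getD "assists" 0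

-- the three loop conditions of A (pvPP: `game["goals"] > 0 or game["assists"]`, assists truthy)
def pvPG (g : List (String × Int)) : Bool := decide (pvGoals g > 0)
def pvPA (g : List (String × Int)) : Bool := decide (pvAssists g > 0)
def pvPP (g : List (String × Int)) : Bool := decide (pvGoals g > 0) || decide (pvAssists g ≠ 0)

-- parsedData's six counters (in dict insertion order) and the three flags of A's loop
structure PvSt where
  gl : Int
  gs : Int
  al : Int
  az : Int
  pl : Int
  ps : Int
  gS : Bool
  aS : Bool
  pS : Bool
deriving Repr, DecidableEq

-- the three if/else blocks of A's loop body, in order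
def pvStepG (g : List (String × Int)) (st : PvSt) : PvSt :=
  if st.gS && pvPG g then { st with gl := st.gl + 1, gs := st.gs + pvGoals g }
  else { st with gS := false }
def pvStepA (g : List (String × Int)) (st : PvSt) : PvSt :=
  if st.aS && pvPA g then { st with al := st.al + 1, az := st.az + pvAssists g }
  else { st with aS := false }
def pvStepP (g : List (String × Int)) (st : PvSt) : PvSt :=
  if st.pS && pvPP g then { st with pl := st.pl + 1, ps := st.ps + pvGoals g + pvAssists g }
  else { st with pS := false }

-- `for game in playerGameData:` …
def pvLoop : List (List (String × Int)) → PvSt → PvSt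
  | [], st => st
  | g :: rest, st => pvLoop rest (pvStepP g (pvStepA g (pvStepG g st)))

def extractStreakData (playerGameData : List (List (String × Int))) : List (String × Int) :=
  let st := pvLoop playerGameData ⟨0, 0, 0, 0, 0, 0, true, true, true⟩
  [("goalStreakLength", st.gl), ("goalStreak", st.gs),
   ("assistStreakLength", st.al), ("assistStreak", st.az),
   ("pointStreakLength", st.pl), ("pointStreak", st.ps)]

-- ===== PORT B =====
def extractStreakData_alt (playerGameData : List (List (String × Int))) : List (String × Int) :=
  let goalRun := playerGameData.takeWhile pvPG
  let assistRun := playerGameData.takeWhile pvPA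
  let pointRun := playerGameData.takeWhile pvPP
  [("goalStreakLength", (goalRun.length : Int)),
   ("goalStreak", (goalRun.map pvGoals).sum),
   ("assistStreakLength", (assistRun.length : Int)),
   ("assistStreak", (assistRun.map pvAssists).sum),
   ("pointStreakLength", (pointRun.length : Int)),
   ("pointStreak", (pointRun.map (fun g => pvGoals g + pvAssists g)).sum)]

-- ===== PRECONDITION & SPEC =====
-- Pre_ excludes exactly the inputs on which Python A raises KeyError: a game missing "goals" or "assists".
def Pre_extractStreakData (playerGameData : List (List (String × Int))) : Prop :=
  ∀ g ∈ playerGameData, "goals" ∈ g.map Prod.fst ∧ "assists" ∈ g.map Prod.fst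
instance (playerGameData : List (List (String × Int))) : Decidable (Pre_extractStreakData playerGameData) := by unfold Pre_extractStreakData; infer_instance

def pvWitness_extractStreakData : (List (List (String × Int))) :=
  [[("goals", 1), ("assists", 0)], [("goals", 0), ("assists", 2)]]

def Spec_extractStreakData (playerGameData : List (List (String × Int))) (out : List (String × Int)) : Prop := out = extractStreakData_alt playerGameData
instance (playerGameData : List (List (String × Int))) (out : List (String × Int)) : Decidable (Spec_extractStreakData playerGameData out) := by unfold Spec_extractStreakData; infer_instance

-- ===== CLAIM (what is proved, stated in full; the proofs are below) =====
def Claim_equal_extractStreakData : Prop := ∀ (playerGameData : List (List (String × Int))), Dom_extractStreakData playerGameData → Pre_extractStreakData playerGameData → Spec_extractStreakData playerGameData (extractStreakData playerGameData)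

-- ===== LEMMAS AND PROOFS =====

-- invariant of A's loop: each stream contributes its leading-run length/sum while its flag holds,
-- and its flag survives exactly when every game so far satisfies its condition
lemma pvLoop_eq (l : List (List (String × Int))) (st : PvSt) :
    pvLoop l st =
    { gl := st.gl + (if st.gS then ((l.takeWhile pvPG).length : Int) else 0),
      gs := st.gs + (if st.gS then ((l.takeWhile pvPG).map pvGoals).sum else 0),
      al := st.al + (if st.aS then ((l.takeWhile pvPA).length : Int) else 0),
      az := st.az + (if st.aS then ((l.takeWhile pvPA).map pvAssists).sum else 0),
      pl := st.pl + (if st.pS then ((l.takeWhile pvPP).length : Int) else 0),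
      ps := st.ps + (if st.pS then ((l.takeWhile pvPP).map (fun g => pvGoals g + pvAssists g)).sum else 0),
      gS := st.gS && l.all pvPG,
      aS := st.aS && l.all pvPA,
      pS := st.pS && l.all pvPP } := by
  induction l generalizing st with
  | nil => simp [pvLoop]
  | cons g rest ih =>
    obtain ⟨gl, gs, al, az, pl, ps, gS, aS, pS⟩ := st
    rw [pvLoop, ih]
    cases hg : pvPG g <;> cases ha : pvPA g <;> cases hp : pvPP g <;>
      cases gS <;> cases aS <;> cases pS <;>
      simp [pvStepG, pvStepA, pvStepP, hg, ha, hp, PvSt.mk.injEq] <;>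
      and_intros <;> ring

-- ===== VERDICT (by name: the statement is the Claim_ definition above) =====
theorem extractStreakData_spec : Claim_equal_extractStreakData := by
  intro pgd _ _
  show _ = _
  simp [extractStreakData, extractStreakData_alt, pvLoop_eq]
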